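-- pv_equiv track=rewrite | github.com/nehalmuthu/MinMaxALgorithm-GoGame | my_player.py | getSideCounts
-- ===== SOURCE A (Python) =====
-- BOARD_SIZE = 5
--
-- def getSideCounts(board,piece):
--     opponent_piece=3-piece
--     side_edge_count = 0
--     opponent_side_edge_count = 0
--     for j in range(BOARD_SIZE):
--         if board[0][j] == piece:
--             side_edge_count += 1
--         if board[BOARD_SIZE - 1][j] == piece:
--             side_edge_count += 1
--         if board[BOARD_SIZE - 1][j] == opponent_piece:
--             opponent_side_edge_count += 1
--         if board[0][j] == opponent_piece:
--             opponent_side_edge_count += 1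
--
--     for j in range(1, BOARD_SIZE - 1):
--         if board[j][BOARD_SIZE - 1] == piece:
--             side_edge_count += 1
--         if board[j][0] == piece:
--             side_edge_count += 1
--         if board[j][0] == opponent_piece:
--             opponent_side_edge_count += 1
--         if board[j][BOARD_SIZE - 1] == opponent_piece:
--             opponent_side_edge_count += 1
--     return side_edge_count,opponent_side_edge_count
-- ===== SOURCE B (Python) =====
-- BOARD_SIZE = 5
--
-- def getSideCounts(board, piece):
--     side_edge_count = 0
--     opponent_side_edge_count = 0
--     for i in range(BOARD_SIZE):
--         for j in range(BOARD_SIZE):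
--             if i == 0 or i == BOARD_SIZE - 1 or j == 0 or j == BOARD_SIZE - 1:
--                 v = board[i][j]
--                 if v == piece:
--                     side_edge_count += 1
--                 elif v == 3 - piece:
--                     opponent_side_edge_count += 1
--     return side_edge_count, opponent_side_edge_count
-- ===== Notes on version B (the rewrite author's own statement) =====
-- stated objective: alternative
-- what changed: Replaces A's two perimeter walks (top/bottom row pass plus left/right column pass) by one row-major full-grid scan gated by a border predicate, with the piece/opponent test folded into a single if/elif per cell.
import Mathlib
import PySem

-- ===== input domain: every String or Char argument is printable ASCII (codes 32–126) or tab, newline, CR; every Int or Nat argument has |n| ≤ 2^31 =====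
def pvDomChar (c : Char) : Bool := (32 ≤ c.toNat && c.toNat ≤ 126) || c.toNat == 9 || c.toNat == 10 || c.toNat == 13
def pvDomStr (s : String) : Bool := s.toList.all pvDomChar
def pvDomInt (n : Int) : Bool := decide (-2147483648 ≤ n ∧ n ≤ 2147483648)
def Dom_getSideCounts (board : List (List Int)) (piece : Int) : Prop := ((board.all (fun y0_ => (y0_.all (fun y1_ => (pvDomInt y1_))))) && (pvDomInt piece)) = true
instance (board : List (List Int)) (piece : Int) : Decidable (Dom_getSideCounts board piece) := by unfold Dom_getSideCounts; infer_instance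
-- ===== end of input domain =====

-- B replaces A's two perimeter walks by one row-major full-grid scan gated by a
-- border predicate (alternative decomposition, same cost on the constant 5x5 board).

-- shared accessor: board[i][j]; Pre_ guarantees both indices are in range, so
-- the defaults are never reached on admitted inputs
def pvCell (board : List (List Int)) (i j : Int) : Int :=
  PySem.List.pyGetD (PySem.List.pyGetD board i []) j 0

-- ===== PORT A =====
def getSideCounts (board : List (List Int)) (piece : Int) : Int × Int :=
  let opponent_piece := 3 - piece
  -- first loop: for j in range(BOARD_SIZE)
  let st1 := (PySem.List.pyRange 0 5 1).foldl (fun (st : Int × Int) j =>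
    let s := st.1
    let o := st.2
    let s := if pvCell board 0 j = piece then s + 1 else s
    let s := if pvCell board 4 j = piece then s + 1 else s
    let o := if pvCell board 4 j = opponent_piece then o + 1 else o
    let o := if pvCell board 0 j = opponent_piece then o + 1 else o
    (s, o)) (0, 0)
  -- second loop: for j in range(1, BOARD_SIZE - 1)
  (PySem.List.pyRange 1 4 1).foldl (fun (st : Int × Int) j =>
    let s := st.1
    let o := st.2
    let s := if pvCell board j 4 = piece then s + 1 else s
    let s := if pvCell board j 0 = piece then s + 1 else s
    let o := if pvCell board j 0 = opponent_piece then o + 1 else o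
    let o := if pvCell board j 4 = opponent_piece then o + 1 else o
    (s, o)) st1

-- ===== PORT B =====
def getSideCounts_alt (board : List (List Int)) (piece : Int) : Int × Int :=
  (PySem.List.pyRange 0 5 1).foldl (fun (st : Int × Int) i =>
    (PySem.List.pyRange 0 5 1).foldl (fun (st : Int × Int) j =>
      if i = 0 ∨ i = 4 ∨ j = 0 ∨ j = 4 then
        let v := pvCell board i j
        if v = piece then (st.1 + 1, st.2)
        else if v = 3 - piece then (st.1, st.2 + 1)
        else (st.1, st.2)
      else (st.1, st.2)) st) (0, 0)

-- ===== PRECONDITION & SPEC =====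
-- Pre_ excludes exactly the boards on which Python A raises IndexError:
-- fewer than 5 rows, or one of the first 5 rows with fewer than 5 entries.
def Pre_getSideCounts (board : List (List Int)) (piece : Int) : Prop :=
  5 ≤ board.length ∧ ∀ r ∈ board.take 5, 5 ≤ r.length
instance (board : List (List Int)) (piece : Int) : Decidable (Pre_getSideCounts board piece) := by
  unfold Pre_getSideCounts; infer_instance

def pvWitness_getSideCounts : List (List Int) × Int :=
  ([[0,1,2,0,1],[2,0,0,0,1],[1,0,2,0,2],[0,1,0,2,0],[1,2,0,1,0]], 1)

def Spec_getSideCounts (board : List (List Int)) (piece : Int) (out : Int × Int) : Prop := out = getSideCounts_alt board piece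
instance (board : List (List Int)) (piece : Int) (out : Int × Int) : Decidable (Spec_getSideCounts board piece out) := by unfold Spec_getSideCounts; infer_instance

-- ===== CLAIM (what is proved, stated in full; the proofs are below) =====
def Claim_equal_getSideCounts : Prop := ∀ (board : List (List Int)) (piece : Int), Dom_getSideCounts board piece → Pre_getSideCounts board piece → Spec_getSideCounts board piece (getSideCounts board piece)

-- ===== LEMMAS AND PROOFS =====

-- a fold whose step adds per-element indicators to both components is a pair of sums
lemma foldl_pair_add (f g : Int → Int) (l : List Int) (st : Int × Int)
    (step : Int × Int → Int → Int × Int)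
    (hstep : ∀ st j, step st j = (st.1 + f j, st.2 + g j)) :
    l.foldl step st = (st.1 + (l.map f).sum, st.2 + (l.map g).sum) := by
  induction l generalizing st with
  | nil => simp
  | cons x xs ih => simp [hstep, ih]; constructor <;> ring

-- the elif-guarded opponent indicator equals the plain one: v = piece and
-- v = 3 - piece cannot hold together over Int (2 * piece = 3 has no solution)
lemma indOpp (v p : Int) :
    (if v = 3 - p ∧ v ≠ p then (1:Int) else 0) = if v = 3 - p then (1:Int) else 0 := by
  split_ifs <;> simp_all <;> omega

-- ===== VERDICT (by name: the statement is the Claim_ definition above) =====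
theorem getSideCounts_spec : Claim_equal_getSideCounts := by
  intro board piece _ hpre
  obtain ⟨h5, hrows⟩ := hpre
  unfold Spec_getSideCounts
  -- rewrite A's two loops into sums of per-cell indicators
  rw [getSideCounts, getSideCounts_alt]
  rw [foldl_pair_add
        (f := fun j => (if pvCell board j 4 = piece then (1:Int) else 0)
                     + (if pvCell board j 0 = piece then (1:Int) else 0))
        (g := fun j => (if pvCell board j 0 = 3 - piece then (1:Int) else 0)
                     + (if pvCell board j 4 = 3 - piece then (1:Int) else 0))
        (hstep := by intro st j; dsimp only; split_ifs <;> simp_all [Prod.ext_iff] <;> omega)]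
  rw [foldl_pair_add
        (f := fun j => (if pvCell board 0 j = piece then (1:Int) else 0)
                     + (if pvCell board 4 j = piece then (1:Int) else 0))
        (g := fun j => (if pvCell board 4 j = 3 - piece then (1:Int) else 0)
                     + (if pvCell board 0 j = 3 - piece then (1:Int) else 0))
        (hstep := by intro st j; dsimp only; split_ifs <;> simp_all [Prod.ext_iff] <;> omega)]
  -- rewrite B's grid scan into a double sum of the same indicators
  rw [foldl_pair_add
        (f := fun i => (PySem.List.pyRange 0 5 1).map (fun j =>
                if i = 0 ∨ i = 4 ∨ j = 0 ∨ j = 4 then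
                  (if pvCell board i j = piece then (1:Int) else 0) else 0) |>.sum)
        (g := fun i => (PySem.List.pyRange 0 5 1).map (fun j =>
                if i = 0 ∨ i = 4 ∨ j = 0 ∨ j = 4 then
                  (if pvCell board i j = 3 - piece ∧ pvCell board i j ≠ piece then (1:Int) else 0) else 0) |>.sum)
        (hstep := by
          intro st i
          rw [foldl_pair_add
            (f := fun j => if i = 0 ∨ i = 4 ∨ j = 0 ∨ j = 4 then
                    (if pvCell board i j = piece then (1:Int) else 0) else 0)
            (g := fun j => if i = 0 ∨ i = 4 ∨ j = 0 ∨ j = 4 then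
                    (if pvCell board i j = 3 - piece ∧ pvCell board i j ≠ piece then (1:Int) else 0) else 0)
            (hstep := by intro st j; dsimp only; split_ifs <;> simp_all)])]
  -- destructure the board (Pre_ gives five rows of five)
  match board, h5 with
  | r0 :: r1 :: r2 :: r3 :: r4 :: rest, _ =>
    have h0 := hrows r0 (by simp [List.take])
    have h1 := hrows r1 (by simp [List.take])
    have h2 := hrows r2 (by simp [List.take])
    have h3 := hrows r3 (by simp [List.take])
    have h4 := hrows r4 (by simp [List.take])
    match r0, h0 with
    | a0 :: a1 :: a2 :: a3 :: a4 :: _, _ =>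
    match r1, h1 with
    | b0 :: b1 :: b2 :: b3 :: b4 :: _, _ =>
    match r2, h2 with
    | c0 :: c1 :: c2 :: c3 :: c4 :: _, _ =>
    match r3, h3 with
    | d0 :: d1 :: d2 :: d3 :: d4 :: _, _ =>
    match r4, h4 with
    | e0 :: e1 :: e2 :: e3 :: e4 :: _, _ =>
      simp only [show PySem.List.pyRange 0 5 1 = [0,1,2,3,4] from by decide,
                 show PySem.List.pyRange 1 4 1 = [1,2,3] from by decide,
                 List.map_cons, List.map_nil, List.sum_cons, List.sum_nil]
      simp only [pysem, pvCell, indOpp]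
      norm_num [Prod.ext_iff]
      constructor <;> ring
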